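-- pv_equiv track=rewrite | github.com/pypi-data/pypi-mirror-85 | packages/huoutil/huoutil-1.3-py3-none-any.whl/huoutil/util.py | splite_sentence
-- ===== SOURCE A (Python) =====
-- def splite_sentence(text):
--     long_sep = u'\x03\x04。！？；!?;'
--     short_sep = u'，,:： '
--     long_sents = []
--     offset_begin = 0
--     short_sents = []
--     for i, e in enumerate(text):
--         if e in short_sep:
--             short_sents.append(text[offset_begin:i + 1])
--             offset_begin = i + 1
--         elif e in long_sep:
--             short_sents.append(text[offset_begin:i + 1])
--             long_sents.append(short_sents)
--             short_sents = []
--             offset_begin = i + 1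
--         else:
--             pass
--     if offset_begin != len(text):
--         short_sents.append(text[offset_begin:])
--     if short_sents:
--         long_sents.append(short_sents)
--     return long_sents
-- ===== SOURCE B (Python) =====
-- def splite_sentence(text):
--     long_sep = u'\x03\x04。！？；!?;'
--     short_sep = u'，,:： '
--     # pass 1: tokenize into (segment, kind) tokens, building segments incrementally
--     tokens = []
--     buf = []
--     for ch in text:
--         buf.append(ch)
--         if ch in short_sep:
--             tokens.append((''.join(buf), 'short'))
--             buf = []
--         elif ch in long_sep:
--             tokens.append((''.join(buf), 'long'))
--             buf = []
--     if buf: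
--         tokens.append((''.join(buf), 'none'))
--     # pass 2: group tokens into sentences, flushing on 'long'
--     long_sents = []
--     short_sents = []
--     for seg, kind in tokens:
--         short_sents.append(seg)
--         if kind == 'long':
--             long_sents.append(short_sents)
--             short_sents = []
--     if short_sents:
--         long_sents.append(short_sents)
--     return long_sents
-- ===== Notes on version B (the rewrite author's own statement) =====
-- stated objective: alternative
-- what changed: A's single fused loop that tracks an offset and slices text[begin:i+1] is replaced by two passes: a tokenizer that builds each segment incrementally in a character buffer (no index arithmetic or slicing) tagging it short/long/trailing, then a separate grouping pass over the token list that flushes on long separators.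
import Mathlib
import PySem

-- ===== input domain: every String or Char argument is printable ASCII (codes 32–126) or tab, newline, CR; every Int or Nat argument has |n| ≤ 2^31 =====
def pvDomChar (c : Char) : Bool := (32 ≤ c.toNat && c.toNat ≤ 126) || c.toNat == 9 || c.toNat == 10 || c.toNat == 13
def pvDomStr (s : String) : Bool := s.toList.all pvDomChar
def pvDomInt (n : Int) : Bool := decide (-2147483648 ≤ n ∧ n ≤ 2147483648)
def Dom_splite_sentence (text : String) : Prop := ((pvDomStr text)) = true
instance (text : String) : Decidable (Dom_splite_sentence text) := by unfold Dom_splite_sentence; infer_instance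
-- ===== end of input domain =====

-- B replaces A's fused index/slicing loop by two passes: a tokenizer that builds each
-- segment incrementally (no slicing) tagged short/long/none, then a grouping pass (objective: alternative).

-- ===== PORT A =====
def pvSepLongA : List Char := "\x03\x04。！？；!?;".toList
def pvSepShortA : List Char := "，,:： ".toList

def pvStepA (cs : List Char) (st : List (List String) × List String × Int) (p : Int × Char) :
    List (List String) × List String × Int :=
  if p.2 ∈ pvSepShortA then
    (st.1, st.2.1 ++ [String.ofList (PySem.List.slice cs (some st.2.2) (some (p.1 + 1)))], p.1 + 1)
  else if p.2 ∈ pvSepLongA then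
    (st.1 ++ [st.2.1 ++ [String.ofList (PySem.List.slice cs (some st.2.2) (some (p.1 + 1)))]], [], p.1 + 1)
  else st

def splite_sentence (text : String) : List (List String) :=
  let cs := text.toList
  let st := (PySem.List.enumerate cs 0).foldl (pvStepA cs) ([], [], (0 : Int))
  let short := if st.2.2 ≠ (cs.length : Int)
    then st.2.1 ++ [String.ofList (PySem.List.slice cs (some st.2.2) none)] else st.2.1
  if short ≠ [] then st.1 ++ [short] else st.1

-- ===== PORT B =====
inductive PvKind | short | long | rest
deriving DecidableEq, Repr

def pvSepLongB : List Char := "\x03\x04。！？；!?;".toList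
def pvSepShortB : List Char := "，,:： ".toList

def pvTokenize : List Char → List Char → List (String × PvKind)
  | buf, [] => if buf ≠ [] then [(String.ofList buf, PvKind.rest)] else []
  | buf, c :: rs =>
    if c ∈ pvSepShortB then (String.ofList (buf ++ [c]), PvKind.short) :: pvTokenize [] rs
    else if c ∈ pvSepLongB then (String.ofList (buf ++ [c]), PvKind.long) :: pvTokenize [] rs
    else pvTokenize (buf ++ [c]) rs

def pvGroup : List (String × PvKind) → List String → List (List String)
  | [], short => if short ≠ [] then [short] else []
  | (s, k) :: ts, short =>
    if k = PvKind.long then (short ++ [s]) :: pvGroup ts []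
    else pvGroup ts (short ++ [s])

def splite_sentence_alt (text : String) : List (List String) :=
  pvGroup (pvTokenize [] text.toList) []

-- ===== PRECONDITION & SPEC =====
def Spec_splite_sentence (text : String) (out : List (List String)) : Prop := out = splite_sentence_alt text
instance (text : String) (out : List (List String)) : Decidable (Spec_splite_sentence text out) := by unfold Spec_splite_sentence; infer_instance

-- ===== CLAIM (what is proved, stated in full; the proofs are below) =====
def Claim_equal_splite_sentence : Prop := ∀ (text : String), Dom_splite_sentence text → Spec_splite_sentence text (splite_sentence text)

-- ===== LEMMAS AND PROOFS =====

def pvFinishA (cs : List Char) (st : List (List String) × List String × Int) : List (List String) :=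
  let short := if st.2.2 ≠ (cs.length : Int)
    then st.2.1 ++ [String.ofList (PySem.List.slice cs (some st.2.2) none)] else st.2.1
  if short ≠ [] then st.1 ++ [short] else st.1

lemma pv_main (cs : List Char) : ∀ (rest buf : List Char) (b : Nat)
    (long : List (List String)) (short : List String),
    cs.drop b = buf ++ rest → b ≤ cs.length →
    pvFinishA cs ((PySem.List.enumerate rest ((b : Int) + buf.length)).foldl (pvStepA cs) (long, short, (b : Int)))
      = long ++ pvGroup (pvTokenize buf rest) short := by
  intro rest
  induction rest with
  | nil =>
    intro buf b long short hdrop hb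
    have hlen : cs.length - b = buf.length := by simpa using congrArg List.length hdrop
    simp only [pvTokenize, PySem.List.enumerate_nil, List.foldl_nil, pvFinishA]
    by_cases hbuf : buf = []
    · have hbe : b = cs.length := by subst hbuf; simp at hlen; omega
      subst hbuf
      simp only [hbe, ne_eq, not_true_eq_false, if_false, ite_not]
      simp [pvGroup]
      split_ifs <;> simp_all
    · have hbe : b ≠ cs.length := by
        intro h; apply hbuf
        have : buf.length = 0 := by omega
        simpa using this
      have hsl : PySem.List.slice cs (some (b : Int)) none = buf := by
        rw [PySem.List.slice_from_natCast]; simpa using hdrop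
      have hbe' : (b : Int) ≠ (cs.length : Int) := by exact_mod_cast hbe
      simp only [hbe', ne_eq, not_false_eq_true, if_true, hsl, if_pos, hbuf, if_neg]
      simp [pvGroup, hbuf]
  | cons c rs ih =>
    intro buf b long short hdrop hb
    have hlen : buf.length + 1 + rs.length = cs.length - b := by
      have := congrArg List.length hdrop; simp at this; omega
    rw [PySem.List.enumerate_cons, List.foldl_cons]
    have hidx : (b : Int) + (buf.length : Int) + 1 = ((b + buf.length + 1 : Nat) : Int) := by push_cast; ring
    have hseg : PySem.List.slice cs (some (b : Int)) (some ((b + buf.length + 1 : Nat) : Int)) = buf ++ [c] := by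
      rw [← hidx]
      have hcast : (b : Int) + (buf.length : Int) + 1 = (b : Int) + ((buf.length + 1 : Nat) : Int) := by push_cast; ring
      rw [hcast, PySem.List.slice_natCast_add, hdrop]
      exact List.take_length_add_append 1
    have hdrop' : cs.drop (b + buf.length + 1) = rs := by
      have h1 : (cs.drop b).drop (buf.length + 1) = cs.drop (b + (buf.length + 1)) := List.drop_drop
      rw [hdrop] at h1
      have h2 : (buf ++ c :: rs).drop (buf.length + 1) = rs := by
        have he : buf ++ c :: rs = (buf ++ [c]) ++ rs := by simp
        rw [he]
        simpa using List.drop_length_add_append (i := 0) (l₂ := rs) (l₁ := buf ++ [c])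
      have h3 : b + buf.length + 1 = b + (buf.length + 1) := by omega
      rw [h3, ← h1, h2]
    have hb' : b + buf.length + 1 ≤ cs.length := by omega
    by_cases hcS : c ∈ pvSepShortA
    · have step : pvStepA cs (long, short, (b : Int)) ((b : Int) + (buf.length : Int), c)
          = (long, short ++ [String.ofList (buf ++ [c])], ((b + buf.length + 1 : Nat) : Int)) := by
        simp only [pvStepA, hcS, if_pos, hidx, hseg]
      rw [step]
      have hrw := ih [] (b + buf.length + 1) long (short ++ [String.ofList (buf ++ [c])]) (by simpa using hdrop') hb'
      simp only [List.length_nil, Nat.cast_zero, add_zero] at hrw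
      rw [hidx, hrw]
      have hcS' : c ∈ pvSepShortB := hcS
      simp [pvTokenize, hcS', pvGroup]
    · by_cases hcL : c ∈ pvSepLongA
      · have step : pvStepA cs (long, short, (b : Int)) ((b : Int) + (buf.length : Int), c)
            = (long ++ [short ++ [String.ofList (buf ++ [c])]], [], ((b + buf.length + 1 : Nat) : Int)) := by
          simp only [pvStepA, hcL, if_pos, hidx, hseg]
          simp [hcS]
        rw [step]
        have hrw := ih [] (b + buf.length + 1) (long ++ [short ++ [String.ofList (buf ++ [c])]]) [] (by simpa using hdrop') hb'
        simp only [List.length_nil, Nat.cast_zero, add_zero] at hrw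
        rw [hidx, hrw]
        have hcS' : c ∉ pvSepShortB := hcS
        have hcL' : c ∈ pvSepLongB := hcL
        simp [pvTokenize, hcS', hcL', pvGroup]
      · have step : pvStepA cs (long, short, (b : Int)) ((b : Int) + (buf.length : Int), c)
            = (long, short, (b : Int)) := by
          simp [pvStepA, hcS, hcL]
        rw [step]
        have hrw := ih (buf ++ [c]) b long short (by simp [hdrop]) hb
        have hlc : ((buf ++ [c]).length : Int) = (buf.length : Int) + 1 := by simp
        rw [hlc, ← add_assoc] at hrw
        rw [hrw]
        have hcS' : c ∉ pvSepShortB := hcS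
        have hcL' : c ∉ pvSepLongB := hcL
        simp [pvTokenize, hcS', hcL']

-- ===== VERDICT (by name: the statement is the Claim_ definition above) =====
theorem splite_sentence_spec : Claim_equal_splite_sentence := by
  intro text _
  show splite_sentence text = splite_sentence_alt text
  have h := pv_main text.toList text.toList [] 0 [] [] (by simp) (by simp)
  simp only [Nat.cast_zero, List.length_nil, add_zero, List.nil_append] at h
  exact h
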